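-- pv_equiv track=rewrite | github.com/danielabramiani/GOA | my work/python/recources/.py | pop_blocks
-- ===== SOURCE A (Python) =====
-- def pop_blocks(lst):
--     stack = []
--     i = 0
--     while i < len(lst):
--         if stack and stack[-1] == lst[i]:
--             while i < len(lst) and stack[-1] == lst[i]:
--                 i += 1
--             stack.pop()
--         else:
--             stack.append(lst[i])
--             i += 1
--     return stack
-- ===== SOURCE B (Python) =====
-- from itertools import groupby
--
-- def pop_blocks(lst):
--     stack = []
--     for v, g in groupby(lst):
--         c = sum(1 for _ in g)
--         if stack and stack[-1] == v:
--             stack.pop()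
--         elif c == 1:
--             stack.append(v)
--     return stack
-- ===== Notes on version B (the rewrite author's own statement) =====
-- stated objective: simpler
-- what changed: Replaces A's nested while-loops with manual index advancement by a run-length-encoding pre-pass (itertools.groupby) followed by flat per-group stack logic: pop if the group's value matches the top, push only singleton groups, ignore longer non-matching groups.
import Mathlib
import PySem

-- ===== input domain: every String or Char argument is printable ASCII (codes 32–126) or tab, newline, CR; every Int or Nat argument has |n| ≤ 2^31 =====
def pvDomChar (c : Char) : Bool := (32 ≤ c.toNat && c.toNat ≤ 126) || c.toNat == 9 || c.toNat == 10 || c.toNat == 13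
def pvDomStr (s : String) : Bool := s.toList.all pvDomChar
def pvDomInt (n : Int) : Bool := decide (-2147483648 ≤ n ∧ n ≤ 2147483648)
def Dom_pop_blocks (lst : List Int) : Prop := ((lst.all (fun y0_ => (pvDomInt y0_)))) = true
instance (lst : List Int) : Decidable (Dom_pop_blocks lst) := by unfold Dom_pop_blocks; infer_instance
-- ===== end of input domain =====

-- B replaces A's nested while-loops (index advancement) by a run-length-encoding
-- pre-pass plus flat per-group stack logic (objective: simpler).
-- The Python stack (append/pop at the end, stack[-1] = top) is represented head-first
-- (top = head); the result is reversed at the end to restore Python's order.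

-- ===== PORT A =====
-- inner 'while i < len(lst) and stack[-1] == lst[i]: i += 1', returning the new i.
def popA_inner (lst : List Int) (top : Int) (i : Nat) : Nat :=
  if h : i < lst.length then
    if top = lst[i] then popA_inner lst top (i + 1) else i
  else i
termination_by lst.length - i

theorem popA_inner_ge (lst : List Int) (top : Int) (i : Nat) : i ≤ popA_inner lst top i := by
  fun_induction popA_inner <;> omega

-- outer while loop.  When 'stack and stack[-1] == lst[i]' holds, the inner while's
-- first iteration is guaranteed (its condition is exactly the outer test), so the
-- port runs the inner loop from i+1; this is step-for-step the same computation.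
def popA_loop (lst : List Int) (stack : List Int) (i : Nat) : List Int :=
  if h : i < lst.length then
    match stack with
    | t :: rest =>
      if t = lst[i] then popA_loop lst rest (popA_inner lst t (i + 1))
      else popA_loop lst (lst[i] :: t :: rest) (i + 1)
    | [] => popA_loop lst (lst[i] :: []) (i + 1)
  else stack
termination_by lst.length - i
decreasing_by
  · have := popA_inner_ge lst t (i + 1); omega
  · omega
  · omega

def pop_blocks (lst : List Int) : List Int := (popA_loop lst [] 0).reverse

-- ===== PORT B =====
-- run-length encoding of lst into maximal (value, count) groups (= itertools.groupby
-- with the count of each group computed in full).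
def takeRun (v : Int) : List Int → Nat × List Int
  | [] => (0, [])
  | x :: xs => if x = v then ((takeRun v xs).1 + 1, (takeRun v xs).2) else (0, x :: xs)

theorem takeRun_len_le (v : Int) (xs : List Int) : (takeRun v xs).2.length ≤ xs.length := by
  induction xs with
  | nil => simp [takeRun]
  | cons x xs ih => simp only [takeRun]; split
                    · simp; omega
                    · simp

def rleGroups : List Int → List (Int × Nat)
  | [] => []
  | x :: xs => (x, (takeRun x xs).1 + 1) :: rleGroups (takeRun x xs).2
termination_by l => l.length
decreasing_by have := takeRun_len_le x xs; simpa using Nat.lt_succ_of_le this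

-- per-group body of the for-loop over groupby
def groupStep (stack : List Int) (vc : Int × Nat) : List Int :=
  match stack with
  | t :: rest => if t = vc.1 then rest else if vc.2 = 1 then vc.1 :: t :: rest else t :: rest
  | [] => if vc.2 = 1 then vc.1 :: [] else []

def pop_blocks_alt (lst : List Int) : List Int :=
  ((rleGroups lst).foldl groupStep []).reverse

-- ===== PRECONDITION & SPEC =====
def Spec_pop_blocks (lst : List Int) (out : List Int) : Prop := out = pop_blocks_alt lst
instance (lst : List Int) (out : List Int) : Decidable (Spec_pop_blocks lst out) := by unfold Spec_pop_blocks; infer_instance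

-- ===== CLAIM (what is proved, stated in full; the proofs are below) =====
def Claim_equal_pop_blocks : Prop := ∀ (lst : List Int), Dom_pop_blocks lst → Spec_pop_blocks lst (pop_blocks lst)

-- ===== LEMMAS AND PROOFS =====

-- suffix view of A's outer loop: state is (stack, remaining suffix)
def skipRun (t : Int) : List Int → List Int
  | [] => []
  | x :: xs => if t = x then skipRun t xs else x :: xs

theorem skipRun_len_le (t : Int) (xs : List Int) : (skipRun t xs).length ≤ xs.length := by
  induction xs with
  | nil => simp [skipRun]
  | cons x xs ih => simp only [skipRun]; split
                    · simp; omega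
                    · simp

def popS (stack : List Int) : List Int → List Int
  | [] => stack
  | x :: xs =>
    match stack with
    | t :: rest => if t = x then popS rest (skipRun t xs) else popS (x :: t :: rest) xs
    | [] => popS (x :: []) xs
termination_by l => l.length
decreasing_by
  · have := skipRun_len_le t xs; simpa using Nat.lt_succ_of_le this
  · simp
  · simp

theorem popS_nil (stack : List Int) : popS stack [] = stack := by
  rw [popS.eq_def]

theorem popS_cons_cons (t x : Int) (rest xs : List Int) :
    popS (t :: rest) (x :: xs) =
      if t = x then popS rest (skipRun t xs) else popS (x :: t :: rest) xs := by
  rw [popS.eq_def]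

theorem popS_nil_cons (x : Int) (xs : List Int) : popS [] (x :: xs) = popS [x] xs := by
  rw [popS.eq_def]

theorem rleGroups_nil : rleGroups [] = [] := by
  rw [rleGroups.eq_def]

theorem popA_inner_drop (lst : List Int) (t : Int) (i : Nat) :
    lst.drop (popA_inner lst t i) = skipRun t (lst.drop i) := by
  fun_induction popA_inner with
  | case1 i h heq ih =>
    rw [ih, List.drop_eq_getElem_cons h, skipRun]
    simp [heq]
  | case2 i h heq =>
    rw [List.drop_eq_getElem_cons h, skipRun]
    simp [heq]
  | case3 i h =>
    have hnil : lst.drop i = [] := List.drop_eq_nil_of_le (by omega)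
    rw [hnil, skipRun]

theorem popA_loop_eq_popS (lst stack : List Int) (i : Nat) :
    popA_loop lst stack i = popS stack (lst.drop i) := by
  fun_induction popA_loop with
  | case1 i h rest ih =>
    rw [ih, popA_inner_drop, List.drop_eq_getElem_cons h, popS_cons_cons, if_pos rfl]
  | case2 i h t rest hne ih =>
    rw [ih, List.drop_eq_getElem_cons h, popS_cons_cons, if_neg hne]
  | case3 i h ih =>
    rw [ih, List.drop_eq_getElem_cons h, popS_nil_cons]
  | case4 stack i h =>
    have hnil : lst.drop i = [] := List.drop_eq_nil_of_le (by omega)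
    rw [hnil, popS_nil]

theorem skipRun_eq_takeRun (t : Int) (xs : List Int) : skipRun t xs = (takeRun t xs).2 := by
  induction xs with
  | nil => simp [skipRun, takeRun]
  | cons x xs ih =>
    simp only [skipRun, takeRun]
    split
    · next h => simp [h.symm, ih]
    · next h =>
      have hnx : ¬ x = t := fun hc => h hc.symm
      simp [hnx]

-- after A pushes x onto a non-matching stack, the rest of the run cancels it (run
-- length ≥ 2) or the push survives (run length 1); either way this matches B's
-- per-group step, whose value on the original stack is supplied as hypothesis hg.
theorem push_case (x : Int) (xs stack : List Int)
    (ih : ∀ s : List Int, popS s (takeRun x xs).2 =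
      (rleGroups (takeRun x xs).2).foldl groupStep s)
    (hg : groupStep stack (x, (takeRun x xs).1 + 1) =
      if (takeRun x xs).1 = 0 then x :: stack else stack) :
    popS (x :: stack) xs =
      (rleGroups (takeRun x xs).2).foldl groupStep (groupStep stack (x, (takeRun x xs).1 + 1)) := by
  cases xs with
  | nil =>
    simp only [takeRun] at ih hg ⊢
    rw [if_pos trivial] at hg
    rw [hg, popS_nil, rleGroups_nil]
    simp
  | cons y ys =>
    by_cases hyx : y = x
    · simp only [takeRun, if_pos hyx] at ih hg ⊢
      have hne : ¬((takeRun x ys).1 + 1 = 0) := by omega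
      rw [if_neg hne] at hg
      rw [hg, popS_cons_cons, if_pos hyx.symm, skipRun_eq_takeRun]
      exact ih stack
    · simp only [takeRun, if_neg hyx] at ih hg ⊢
      rw [if_pos trivial] at hg
      rw [hg]
      exact ih (x :: stack)

-- the core bridge: A's suffix loop equals B's fold over the run-length groups,
-- for every starting stack
theorem popS_eq_fold (lst : List Int) : ∀ stack : List Int,
    popS stack lst = (rleGroups lst).foldl groupStep stack := by
  fun_induction rleGroups with
  | case1 =>
    intro stack
    rw [popS_nil]
    simp
  | case2 x xs ih =>
    intro stack
    rw [List.foldl_cons]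
    cases stack with
    | nil =>
      rw [popS_nil_cons]
      refine push_case x xs [] ih ?_
      by_cases h0 : (takeRun x xs).1 = 0
      · simp [groupStep, h0]
      · simp [groupStep, h0]
    | cons t rest =>
      by_cases htx : t = x
      · have hgs : groupStep (t :: rest) (x, (takeRun x xs).1 + 1) = rest := by
          simp [groupStep, htx]
        rw [popS_cons_cons, if_pos htx, hgs, htx, skipRun_eq_takeRun]
        exact ih rest
      · rw [popS_cons_cons, if_neg htx]
        refine push_case x xs (t :: rest) ih ?_
        by_cases h0 : (takeRun x xs).1 = 0
        · simp [groupStep, htx, h0]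
        · simp [groupStep, htx, h0]

-- ===== VERDICT (by name: the statement is the Claim_ definition above) =====
theorem pop_blocks_spec : Claim_equal_pop_blocks := by
  intro lst _
  show pop_blocks lst = pop_blocks_alt lst
  unfold pop_blocks pop_blocks_alt
  rw [popA_loop_eq_popS, List.drop_zero, popS_eq_fold]
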